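-- pv_equiv track=rewrite | github.com/MrBrantCode/unitest_baseline | mut_generate/mist_train_taco/taco_7820/solution.py | thanos_sort_length
-- ===== SOURCE A (Python) =====
-- def is_sorted(array):
--     """Helper function to check if the array is sorted in non-decreasing order."""
--     for i in range(len(array) - 1):
--         if array[i + 1] < array[i]:
--             return False
--     return True
--
-- def thanos_sort_length(array):
--     """
--     Returns the maximal length of a sorted array that can be obtained using Thanos sort.
--
--     Parameters:
--     array (list of int): The input array to be sorted.
--
--     Returns:
--     int: The maximal length of a sorted array.
--     """
--     n = len(array)
--
--     if n == 1:
--         return 1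
--     elif is_sorted(array):
--         return n
--     else:
--         # Split the array into two halves
--         first_half = array[:n // 2]
--         second_half = array[n // 2:]
--
--         # Recursively apply Thanos sort to both halves
--         length_first_half = thanos_sort_length(first_half)
--         length_second_half = thanos_sort_length(second_half)
--
--         # Return the maximum length of the sorted subarrays
--         return max(length_first_half, length_second_half)
-- ===== SOURCE B (Python) =====
-- def thanos_sort_length(array):
--     n = len(array)
--     if n <= 1:
--         return n
--
--     def solve(l, r):
--         # returns (max Thanos-sort length of array[l:r], whether array[l:r] is sorted)
--         if r - l == 1:
--             return 1, True
--         m = l + (r - l) // 2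
--         a, sa = solve(l, m)
--         b, sb = solve(m, r)
--         if sa and sb and array[m - 1] <= array[m]:
--             return r - l, True
--         return (a if a >= b else b), False
--
--     return solve(0, n)[0]
-- ===== Notes on version B (the rewrite author's own statement) =====
-- stated objective: faster
-- what changed: Replaces the top-down recursion that re-checks sortedness of every segment by O(k) scans and slicing with a bottom-up index-based recursion that derives each segment's sortedness in O(1) from its two halves and the boundary pair.
import Mathlib
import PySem

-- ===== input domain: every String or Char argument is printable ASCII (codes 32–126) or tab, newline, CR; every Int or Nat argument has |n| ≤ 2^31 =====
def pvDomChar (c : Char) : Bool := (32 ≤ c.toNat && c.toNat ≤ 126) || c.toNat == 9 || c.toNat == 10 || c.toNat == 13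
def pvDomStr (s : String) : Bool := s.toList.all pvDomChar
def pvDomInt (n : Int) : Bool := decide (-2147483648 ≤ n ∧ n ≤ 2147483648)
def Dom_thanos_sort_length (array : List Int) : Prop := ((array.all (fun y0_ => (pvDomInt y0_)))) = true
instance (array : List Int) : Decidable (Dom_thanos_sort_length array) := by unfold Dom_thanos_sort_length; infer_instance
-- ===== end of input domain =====

-- B replaces A's per-segment O(k) sortedness scans over sliced copies by a bottom-up
-- index recursion computing each segment's sortedness in O(1) from its halves (faster, asymptotic).

-- ===== PORT A =====
-- early-exit adjacent-pair loop of Python's is_sorted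
def is_sorted : List Int → Bool
  | a :: b :: rest => if b < a then false else is_sorted (b :: rest)
  | _ => true

def thanos_sort_length (array : List Int) : Int :=
  if array.length == 1 then 1
  else if is_sorted array then (array.length : Int)
  else
    -- array[:n//2] / array[n//2:] with nonnegative bounds = take / drop
    max (thanos_sort_length (array.take (array.length / 2)))
        (thanos_sort_length (array.drop (array.length / 2)))
termination_by array.length
decreasing_by
  · have h2 : 2 ≤ array.length := by
      rcases array with _ | ⟨x, _ | ⟨y, t⟩⟩ <;> simp_all [is_sorted]
    simp
    omega
  · have h2 : 2 ≤ array.length := by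
      rcases array with _ | ⟨x, _ | ⟨y, t⟩⟩ <;> simp_all [is_sorted]
    simp
    omega

-- ===== PORT B =====
-- Source B's solve(l, r); base case covers r - l ≤ 1 (r - l = 0 is unreachable from the
-- entry point, the guard only makes the recursion total)
def solveTS (array : List Int) (l r : Nat) : Int × Bool :=
  if r - l ≤ 1 then ((r - l : Nat), true)
  else
    let m := l + (r - l) / 2
    let p := solveTS array l m
    let q := solveTS array m r
    if p.2 && q.2 && decide (array.getD (m - 1) 0 ≤ array.getD m 0) then ((r - l : Nat), true)
    else ((if p.1 ≥ q.1 then p.1 else q.1), false)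
termination_by r - l
decreasing_by all_goals omega

def thanos_sort_length_alt (array : List Int) : Int :=
  if array.length ≤ 1 then (array.length : Int)
  else (solveTS array 0 array.length).1

-- ===== PRECONDITION & SPEC =====
def Spec_thanos_sort_length (array : List Int) (out : Int) : Prop := out = thanos_sort_length_alt array
instance (array : List Int) (out : Int) : Decidable (Spec_thanos_sort_length array out) := by unfold Spec_thanos_sort_length; infer_instance

-- ===== CLAIM (what is proved, stated in full; the proofs are below) =====
def Claim_equal_thanos_sort_length : Prop := ∀ (array : List Int), Dom_thanos_sort_length array → Spec_thanos_sort_length array (thanos_sort_length array)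

-- ===== LEMMAS AND PROOFS =====


lemma is_sorted_true_iff : ∀ xs : List Int, (is_sorted xs = true ↔ List.IsChain (· ≤ ·) xs)
  | [] => by simp [is_sorted]
  | [a] => by simp [is_sorted]
  | a :: b :: t => by
      rw [is_sorted]
      by_cases h : b < a
      · rw [if_pos h]
        simp only [Bool.false_eq_true, false_iff, List.isChain_cons_cons]
        rintro ⟨hab, -⟩
        omega
      · rw [if_neg h, is_sorted_true_iff (b :: t), List.isChain_cons_cons]
        exact ⟨fun hc => ⟨by omega, hc⟩, fun hc => hc.2⟩

lemma is_sorted_append (xs ys : List Int) (hx : xs ≠ []) (hy : ys ≠ []) :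
    is_sorted (xs ++ ys)
      = (is_sorted xs && is_sorted ys && decide (xs.getD (xs.length - 1) 0 ≤ ys.getD 0 0)) := by
  have h1 : xs.getD (xs.length - 1) 0 = xs.getLast hx := by
    rw [List.getD_eq_getElem _ _ (by cases xs <;> simp_all), List.getLast_eq_getElem]
  have h2 : ys.getD 0 0 = ys.head hy := by
    rw [List.getD_eq_getElem _ _ (by cases ys <;> simp_all), List.head_eq_getElem]
  rw [Bool.eq_iff_iff]
  simp only [Bool.and_eq_true, decide_eq_true_eq, is_sorted_true_iff, h1, h2]
  rw [List.isChain_append, List.getLast?_eq_some_getLast hx, List.head?_eq_some_head hy]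
  simp [and_assoc]

lemma solve_eq (array : List Int) : ∀ (k l r : Nat), r - l = k → l < r → r ≤ array.length →
    solveTS array l r
      = (thanos_sort_length ((array.drop l).take (r - l)),
         is_sorted ((array.drop l).take (r - l))) := by
  intro k
  induction k using Nat.strong_induction_on with
  | _ k ih =>
    intro l r hk hlr hr
    have hlen : ((array.drop l).take (r - l)).length = r - l := by
      simp; omega
    by_cases hbase : r - l ≤ 1
    · -- base: r - l = 1
      have h1 : r - l = 1 := by omega
      rw [solveTS, if_pos hbase]
      rcases hseg : (array.drop l).take (r - l) with _ | ⟨x, _ | ⟨y, t⟩⟩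
      · rw [hseg] at hlen; simp at hlen; omega
      · simp [thanos_sort_length, is_sorted, h1]
      · rw [hseg] at hlen; simp at hlen; omega
    · -- step: r - l ≥ 2
      have h2 : 2 ≤ r - l := by omega
      set m := l + (r - l) / 2 with hm
      have hlm : l < m := by omega
      have hmr : m < r := by omega
      have ih1 := ih (m - l) (by omega) l m rfl hlm (by omega)
      have ih2 := ih (r - m) (by omega) m r rfl hmr hr
      set segL := (array.drop l).take (m - l) with hsegL
      set segR := (array.drop m).take (r - m) with hsegR
      have hLlen : segL.length = m - l := by rw [hsegL]; simp; omega
      have hRlen : segR.length = r - m := by rw [hsegR]; simp; omega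
      have hLne : segL ≠ [] := by intro h; rw [h] at hLlen; simp at hLlen; omega
      have hRne : segR ≠ [] := by intro h; rw [h] at hRlen; simp at hRlen; omega
      have hdd : List.drop m array = List.drop (m - l) (List.drop l array) := by
        rw [List.drop_drop]; congr 1; omega
      have hsplit : (array.drop l).take (r - l) = segL ++ segR := by
        rw [hsegL, hsegR, hdd, ← List.take_add]
        congr 1
        omega
      have hmlt : m - 1 < array.length := by omega
      have hmlt' : m < array.length := by omega
      have hlast : segL.getD (m - l - 1) 0 = array.getD (m - 1) 0 := by
        rw [List.getD_eq_getElem _ _ (by rw [hLlen]; omega), List.getD_eq_getElem _ _ hmlt]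
        simp only [hsegL, List.getElem_take, List.getElem_drop]
        congr 1
        omega
      have hhead : segR.getD 0 0 = array.getD m 0 := by
        rw [List.getD_eq_getElem _ _ (by rw [hRlen]; omega), List.getD_eq_getElem _ _ hmlt']
        simp only [hsegR, List.getElem_take, List.getElem_drop]
        congr 1
      have hsorted : is_sorted ((array.drop l).take (r - l))
          = (is_sorted segL && is_sorted segR && decide (array.getD (m - 1) 0 ≤ array.getD m 0)) := by
        rw [hsplit, is_sorted_append segL segR hLne hRne, hLlen, hlast, hhead]
      have htake : ((array.drop l).take (r - l)).take ((r - l) / 2) = segL := by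
        rw [List.take_take, hsegL]
        congr 1
        omega
      have hdrop : ((array.drop l).take (r - l)).drop ((r - l) / 2) = segR := by
        rw [List.drop_take, List.drop_drop, hsegR]
        congr 1; omega
      have hA : thanos_sort_length ((array.drop l).take (r - l))
          = if is_sorted segL && is_sorted segR && decide (array.getD (m - 1) 0 ≤ array.getD m 0)
            then ((r - l : Nat) : Int)
            else max (thanos_sort_length segL) (thanos_sort_length segR) := by
        rw [thanos_sort_length]
        rw [if_neg (by simp [hlen]; omega)]
        rw [hsorted, hlen, htake, hdrop]
      rw [solveTS, if_neg hbase]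
      dsimp only
      rw [← hm, ih1, ih2, hA, hsorted]
      by_cases hb : (is_sorted segL && is_sorted segR && decide (array.getD (m - 1) 0 ≤ array.getD m 0)) = true
      · rw [if_pos hb, if_pos hb, hb]
      · rw [if_neg hb, if_neg hb]
        refine Prod.ext ?_ ?_
        · show (if thanos_sort_length segL ≥ thanos_sort_length segR
              then thanos_sort_length segL else thanos_sort_length segR)
            = max (thanos_sort_length segL) (thanos_sort_length segR)
          by_cases hab : thanos_sort_length segR ≤ thanos_sort_length segL
          · rw [if_pos hab, max_eq_left hab]
          · rw [if_neg hab, max_eq_right (le_of_not_ge hab)]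
        · exact (Bool.eq_false_iff.mpr hb).symm

-- ===== VERDICT (by name: the statement is the Claim_ definition above) =====
theorem thanos_sort_length_spec : Claim_equal_thanos_sort_length := by
  intro array _
  unfold Spec_thanos_sort_length thanos_sort_length_alt
  by_cases h1 : array.length ≤ 1
  · rw [if_pos h1]
    rcases array with _ | ⟨x, _ | ⟨y, t⟩⟩
    · rw [thanos_sort_length]; simp [is_sorted]
    · rw [thanos_sort_length]; simp
    · simp at h1
  · rw [if_neg h1]
    rw [solve_eq array array.length 0 array.length (by omega) (by omega) le_rfl]
    simp
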